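-- pv_equiv track=rewrite | github.com/kirilenkobm/BDCSP | shuffle_input.py | cast_to_ones
-- ===== SOURCE A (Python) =====
-- def revert(col):
--     """Revert 10101 -> 01010."""
--     return [1 - col[i] for i in range(len(col))]
--
-- def cast_to_ones(arr):
--     """Cast first line to all ones."""
--     columns = []
--     str_num = len(arr)
--     str_len = len(arr[0])
--     for col_num in range(str_len):
--         column = [arr[i][col_num] for i in range(str_num)]
--         if column[0] == 1:
--             columns.append(column)
--             continue
--         rev_col = revert(column)
--         columns.append(rev_col)
--     lines = []
--     for line_num in range(str_num):
--         line = [col[line_num] for col in columns]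
--         lines.append(line)
--     return lines
-- ===== SOURCE B (Python) =====
-- def cast_to_ones(arr):
--     """Cast first line to all ones: one direct row-major pass, no transposition."""
--     str_num = len(arr)
--     str_len = len(arr[0])
--     return [[arr[i][j] if arr[0][j] == 1 else 1 - arr[i][j] for j in range(str_len)]
--             for i in range(str_num)]
-- ===== Notes on version B (the rewrite author's own statement) =====
-- stated objective: simpler
-- what changed: A transposes the matrix into a list of columns, flips each column whose head is not 1, then transposes back; B builds each output row directly in one row-major nested pass using arr[0][j] as the flip decision, with no intermediate column structure (fewer list allocations and one traversal instead of three).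
import Mathlib
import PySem

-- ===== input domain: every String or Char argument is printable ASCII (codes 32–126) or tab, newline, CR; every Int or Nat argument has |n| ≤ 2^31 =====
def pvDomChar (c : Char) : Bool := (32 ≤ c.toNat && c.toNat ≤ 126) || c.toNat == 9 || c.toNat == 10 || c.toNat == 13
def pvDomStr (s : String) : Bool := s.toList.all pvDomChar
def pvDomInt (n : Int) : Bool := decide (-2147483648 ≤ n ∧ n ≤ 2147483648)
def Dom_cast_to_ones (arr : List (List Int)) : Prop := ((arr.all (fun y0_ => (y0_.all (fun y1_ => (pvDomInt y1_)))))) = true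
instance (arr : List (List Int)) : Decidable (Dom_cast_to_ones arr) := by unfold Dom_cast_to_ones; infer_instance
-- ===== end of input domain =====

-- B replaces A's transpose / flip-columns / transpose-back construction by one direct
-- row-major nested pass (simpler, same asymptotic cost); equal return values on Pre_.

-- ===== PORT A =====
-- revert(col) = [1 - col[i] for i in range(len(col))]
def pyRevert (col : List Int) : List Int :=
  (PySem.List.pyRange 0 (col.length : Int)).map (fun i => 1 - PySem.List.pyGetD col i 0)

def cast_to_ones (arr : List (List Int)) : List (List Int) :=
  let str_num : Int := (arr.length : Int)
  let str_len : Int := ((PySem.List.pyGetD arr 0 []).length : Int)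
  let columns :=
    (PySem.List.pyRange 0 str_len).foldl (fun cols col_num =>
      let column := (PySem.List.pyRange 0 str_num).map
        (fun i => PySem.List.pyGetD (PySem.List.pyGetD arr i []) col_num 0)
      if PySem.List.pyGetD column 0 0 = 1 then cols ++ [column]
      else cols ++ [pyRevert column]) []
  (PySem.List.pyRange 0 str_num).foldl (fun lines line_num =>
      lines ++ [columns.map (fun col => PySem.List.pyGetD col line_num 0)]) []

-- ===== PORT B =====
def cast_to_ones_alt (arr : List (List Int)) : List (List Int) :=
  let str_num : Int := (arr.length : Int)
  let str_len : Int := ((PySem.List.pyGetD arr 0 []).length : Int)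
  (PySem.List.pyRange 0 str_num).map (fun i =>
    (PySem.List.pyRange 0 str_len).map (fun j =>
      if PySem.List.pyGetD (PySem.List.pyGetD arr 0 []) j 0 = 1
      then PySem.List.pyGetD (PySem.List.pyGetD arr i []) j 0
      else 1 - PySem.List.pyGetD (PySem.List.pyGetD arr i []) j 0))

-- ===== PRECONDITION & SPEC =====
-- Pre_ excludes exactly the inputs on which Python A raises IndexError: the empty
-- matrix (len(arr[0])) and ragged input with a row shorter than the first row.
def Pre_cast_to_ones (arr : List (List Int)) : Prop :=
  arr ≠ [] ∧ ∀ row ∈ arr, (arr.headD []).length ≤ row.length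
instance (arr : List (List Int)) : Decidable (Pre_cast_to_ones arr) := by
  unfold Pre_cast_to_ones; infer_instance
def pvWitness_cast_to_ones : List (List Int) := [[1, 0], [0, 1]]

def Spec_cast_to_ones (arr : List (List Int)) (out : List (List Int)) : Prop := out = cast_to_ones_alt arr
instance (arr : List (List Int)) (out : List (List Int)) : Decidable (Spec_cast_to_ones arr out) := by unfold Spec_cast_to_ones; infer_instance

-- ===== CLAIM (what is proved, stated in full; the proofs are below) =====
def Claim_equal_cast_to_ones : Prop := ∀ (arr : List (List Int)), Dom_cast_to_ones arr → Pre_cast_to_ones arr → Spec_cast_to_ones arr (cast_to_ones arr)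

-- ===== LEMMAS AND PROOFS =====

-- A's column loop appends one column per iteration, flipped or not: fold ⇒ map.
theorem foldl_append_if_singleton {α β : Type} (p : α → Prop) [DecidablePred p]
    (f g : α → β) (l : List α) (acc : List β) :
    l.foldl (fun acc x => if p x then acc ++ [f x] else acc ++ [g x]) acc
      = acc ++ l.map (fun x => if p x then f x else g x) := by
  induction l generalizing acc with
  | nil => simp
  | cons x t ih =>
    simp only [List.foldl_cons, List.map_cons]
    split <;> rw [ih] <;> simp

theorem cast_to_ones_eq_alt (arr : List (List Int)) :
    cast_to_ones arr = cast_to_ones_alt arr := by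
  unfold cast_to_ones cast_to_ones_alt
  rw [PySem.List.foldl_append_singleton_eq_map, foldl_append_if_singleton,
      List.nil_append, List.nil_append]
  apply List.map_congr_left
  intro li hli
  obtain ⟨hi0, hin⟩ := PySem.List.mem_pyRange_one.mp hli
  rw [List.map_map]
  apply List.map_congr_left
  intro j hj
  simp only [Function.comp]
  have hn0 : 0 < arr.length := by
    by_contra h
    omega
  set h : Int → Int := fun i => PySem.List.pyGetD (PySem.List.pyGetD arr i []) j 0 with hh
  have hcol0 :
      PySem.List.pyGetD ((PySem.List.pyRange 0 (arr.length : Int)).map h) 0 0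
        = PySem.List.pyGetD (PySem.List.pyGetD arr 0 []) j 0 := by
    have := PySem.List.pyGetD_map_pyRange h arr.length 0 0 hn0
    simpa using this
  have hcoli :
      PySem.List.pyGetD ((PySem.List.pyRange 0 (arr.length : Int)).map h) li 0 = h li := by
    have hlt : li.toNat < arr.length := by omega
    have := PySem.List.pyGetD_map_pyRange h arr.length li.toNat 0 hlt
    rwa [Int.toNat_of_nonneg hi0] at this
  have hlen : (((PySem.List.pyRange 0 (arr.length : Int)).map h).length : Int)
      = (arr.length : Int) := by
    simp [PySem.List.pyRange_zero_natCast]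
  split
  · next hc =>
    rw [hcoli, if_pos (by rw [← hcol0]; exact hc)]
  · next hc =>
    rw [if_neg (by rw [← hcol0]; exact hc)]
    unfold pyRevert
    rw [hlen]
    have hlt : li.toNat < arr.length := by omega
    have := PySem.List.pyGetD_map_pyRange
      (fun i => 1 - PySem.List.pyGetD ((PySem.List.pyRange 0 (arr.length : Int)).map h) i 0)
      arr.length li.toNat 0 hlt
    rw [Int.toNat_of_nonneg hi0] at this
    rw [this]
    have hcoli' := hcoli
    simp only [hh] at hcoli' ⊢
    rw [hcoli']

-- ===== VERDICT (by name: the statement is the Claim_ definition above) =====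
theorem cast_to_ones_spec : Claim_equal_cast_to_ones := by
  intro arr _ _
  unfold Spec_cast_to_ones
  exact cast_to_ones_eq_alt arr
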